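-- pv_equiv track=rewrite | github.com/hernyyan/rrrocky | backend/app/services/layer2_response_parser.py | _map_validations_to_fields
-- ===== SOURCE A (Python) =====
-- from typing import Any, Dict, List, Optional
--
-- def _map_validations_to_fields(
--     validation: Dict[str, Any],
--     values: Dict[str, Any],
-- ) -> Dict[str, List[str]]:
--     """
--     For each template field, find which validation checks reference it by name.
--     Searches both the check name and its details text.
--     Returns: {field_name: [check_name, ...]}
--     """
--     field_validations: Dict[str, List[str]] = {}
--     for check_name, check_result in validation.items():
--         details = (
--             check_result.get("details", "")
--             if isinstance(check_result, dict)
--             else str(check_result)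
--         )
--         combined_text = (check_name + " " + details).lower()
--         for field_name in values:
--             if field_name.lower() in combined_text:
--                 field_validations.setdefault(field_name, []).append(check_name)
--     return field_validations
-- ===== SOURCE B (Python) =====
-- def _map_validations_to_fields(validation, values):
--     # Multi-pattern substring matching via a hash index: index the lowered
--     # field names (and their lengths) once, then for each check enumerate the
--     # substrings of those lengths of its text and look them up in the index,
--     # instead of running one substring search per field per check.
--     lowset = {f.lower() for f in values}
--     lengths = {len(s) for s in lowset}
--     field_validations = {}
--     for check_name, check_result in validation.items():
--         details = (check_result.get("details", "")
--                    if isinstance(check_result, dict) else str(check_result))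
--         text = (check_name + " " + details).lower()
--         matched = set()
--         for L in lengths:
--             for i in range(len(text) - L + 1):
--                 s = text[i:i + L]
--                 if s in lowset:
--                     matched.add(s)
--         for field in values:
--             if field.lower() in matched:
--                 field_validations.setdefault(field, []).append(check_name)
--     return field_validations
-- ===== Notes on version B (the rewrite author's own statement) =====
-- stated objective: alternative
-- what changed: A runs one Python substring search per (check, field) pair; B builds a hash index of the lowered field names and their lengths once, then for each check enumerates the substrings of those lengths of its text and looks them up in the index (multi-pattern matching), so no per-field substring search remains.
import Mathlib
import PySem

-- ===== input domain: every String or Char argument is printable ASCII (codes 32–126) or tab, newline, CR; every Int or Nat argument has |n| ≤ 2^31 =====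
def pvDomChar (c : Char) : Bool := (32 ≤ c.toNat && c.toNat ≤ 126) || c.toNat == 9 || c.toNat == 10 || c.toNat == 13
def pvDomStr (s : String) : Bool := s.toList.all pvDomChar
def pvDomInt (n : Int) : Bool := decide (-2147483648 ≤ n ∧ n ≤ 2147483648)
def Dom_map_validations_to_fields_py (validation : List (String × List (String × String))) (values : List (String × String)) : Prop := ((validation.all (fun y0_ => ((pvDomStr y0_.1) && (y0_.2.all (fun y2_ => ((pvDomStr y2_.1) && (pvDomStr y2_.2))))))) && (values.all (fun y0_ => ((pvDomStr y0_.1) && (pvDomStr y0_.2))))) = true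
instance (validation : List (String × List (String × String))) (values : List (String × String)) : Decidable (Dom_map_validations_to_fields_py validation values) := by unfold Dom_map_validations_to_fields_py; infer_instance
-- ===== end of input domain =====

-- B replaces A's per-(check, field) substring search by a hash index of the lowered field
-- names: per check it enumerates the substrings of the indexed lengths once and looks them
-- up in the index (objective: alternative).

-- shared by both ports: the lowered search text of one check ((check_name + " " + details).lower())
-- check_result is a dict[str, str] under the type convention, so the isinstance branch
-- always takes check_result.get("details", "")
def pvLowText (p : String × List (String × String)) : List Char :=
  PySem.Chars.lower (p.1.toList ++ ' ' :: ((PySem.Dict.ofList p.2).getD "details" "").toList)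

-- ===== PORT A =====
-- field_name.lower() in combined_text is Chars.isIn; setdefault(f, []).append(n) is
-- Dict.modify f [] (· ++ [n]).
def map_validations_to_fields_py (validation : List (String × List (String × String))) (values : List (String × String)) : List (String × List String) :=
  (validation.foldl
    (fun d p =>
      let check_name := p.1
      let combined_text := pvLowText p
      values.foldl
        (fun d q =>
          if PySem.Chars.isIn (PySem.Chars.lower q.1.toList) combined_text
          then d.modify q.1 [] (fun l => l ++ [check_name]) else d)
        d)
    (PySem.Dict.empty : PySem.Dict String (List String))).items

-- ===== PORT B =====
-- matched = the set of substrings of text of an indexed length that are lowered field names;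
-- `lengths` is a Python set consumed only to build another set, so its iteration order
-- cannot affect the result. Python's range(len(text)-L+1) is List.range (len+1-L) in Nat
-- (both empty when L > len); text[i:i+L] with 0 ≤ i, i+L ≤ len is (text.drop i).take L.
def pvMatchedSet (lowset : PySem.Set (List Char)) (lengths : List Nat) (text : List Char) : PySem.Set (List Char) :=
  lengths.foldl
    (fun m L =>
      (List.range (text.length + 1 - L)).foldl
        (fun m i =>
          let s := (text.drop i).take L
          if PySem.Set.contains lowset s then PySem.Set.add m s else m)
        m)
    PySem.Set.empty

def map_validations_to_fields_py_alt (validation : List (String × List (String × String))) (values : List (String × String)) : List (String × List String) :=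
  let lowset : PySem.Set (List Char) :=
    PySem.Set.ofList (values.map (fun q => PySem.Chars.lower q.1.toList))
  let lengths : PySem.Set Nat := PySem.Set.ofList (lowset.map List.length)
  (validation.foldl
    (fun d p =>
      let text := pvLowText p
      let matched := pvMatchedSet lowset lengths text
      values.foldl
        (fun d q =>
          if PySem.Set.contains matched (PySem.Chars.lower q.1.toList)
          then d.modify q.1 [] (fun l => l ++ [p.1]) else d)
        d)
    (PySem.Dict.empty : PySem.Dict String (List String))).items

-- ===== PRECONDITION & SPEC =====
def Spec_map_validations_to_fields_py (validation : List (String × List (String × String))) (values : List (String × String)) (out : List (String × List String)) : Prop := out = map_validations_to_fields_py_alt validation values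
instance (validation : List (String × List (String × String))) (values : List (String × String)) (out : List (String × List String)) : Decidable (Spec_map_validations_to_fields_py validation values out) := by unfold Spec_map_validations_to_fields_py; infer_instance

-- ===== CLAIM (what is proved, stated in full; the proofs are below) =====
def Claim_equal_map_validations_to_fields_py : Prop := ∀ (validation : List (String × List (String × String))) (values : List (String × String)), Dom_map_validations_to_fields_py validation values → Spec_map_validations_to_fields_py validation values (map_validations_to_fields_py validation values)

-- ===== LEMMAS AND PROOFS =====

-- membership in a conditional-add fold over a set
lemma mem_foldl_add_if {α β : Type} [BEq α] [LawfulBEq α] (l : List β) (g : β → α) (p : β → Bool) :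
    ∀ (m : PySem.Set α) (x : α),
      x ∈ l.foldl (fun m b => if p b then PySem.Set.add m (g b) else m) m ↔
        x ∈ m ∨ ∃ b ∈ l, p b ∧ x = g b := by
  induction l with
  | nil => intro m x; simp
  | cons b bs ih =>
    intro m x
    simp only [List.foldl_cons]
    by_cases hp : p b
    · rw [if_pos hp, ih, PySem.Set.mem_add]
      constructor
      · rintro (⟨h | h⟩ | ⟨c, hc, hpc, hx⟩)
        · exact Or.inl h
        · exact Or.inr ⟨b, by simp, hp, h⟩
        · exact Or.inr ⟨c, by simp [hc], hpc, hx⟩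
      · rintro (h | ⟨c, hc, hpc, hx⟩)
        · exact Or.inl (Or.inl h)
        · rcases List.mem_cons.mp hc with rfl | hc'
          · exact Or.inl (Or.inr hx)
          · exact Or.inr ⟨c, hc', hpc, hx⟩
    · rw [if_neg hp, ih]
      constructor
      · rintro (h | ⟨c, hc, hpc, hx⟩)
        · exact Or.inl h
        · exact Or.inr ⟨c, by simp [hc], hpc, hx⟩
      · rintro (h | ⟨c, hc, hpc, hx⟩)
        · exact Or.inl h
        · rcases List.mem_cons.mp hc with rfl | hc'
          · exact absurd hpc (by simp [hp])
          · exact Or.inr ⟨c, hc', hpc, hx⟩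

lemma mem_matchedSet (lowset : PySem.Set (List Char)) (lengths : List Nat) (text : List Char) (x : List Char) :
    x ∈ pvMatchedSet lowset lengths text ↔
      ∃ L ∈ lengths, ∃ i ∈ List.range (text.length + 1 - L),
        PySem.Set.contains lowset ((text.drop i).take L) ∧ x = (text.drop i).take L := by
  unfold pvMatchedSet
  have main : ∀ (m : PySem.Set (List Char)),
      x ∈ lengths.foldl (fun m L =>
        (List.range (text.length + 1 - L)).foldl
          (fun m i => if PySem.Set.contains lowset ((text.drop i).take L)
                      then PySem.Set.add m ((text.drop i).take L) else m) m) m ↔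
      x ∈ m ∨ ∃ L ∈ lengths, ∃ i ∈ List.range (text.length + 1 - L),
        PySem.Set.contains lowset ((text.drop i).take L) ∧ x = (text.drop i).take L := by
    induction lengths with
    | nil => intro m; simp
    | cons L Ls ih =>
      intro m
      simp only [List.foldl_cons]
      rw [ih, mem_foldl_add_if (g := fun i => (text.drop i).take L)
            (p := fun i => PySem.Set.contains lowset ((text.drop i).take L))]
      constructor
      · rintro (⟨h | ⟨i, hi, hc, hx⟩⟩ | ⟨L', hL', i, hi, hc, hx⟩)
        · exact Or.inl h
        · exact Or.inr ⟨L, by simp, i, hi, hc, hx⟩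
        · exact Or.inr ⟨L', by simp [hL'], i, hi, hc, hx⟩
      · rintro (h | ⟨L', hL', i, hi, hc, hx⟩)
        · exact Or.inl (Or.inl h)
        · rcases List.mem_cons.mp hL' with rfl | hL''
          · exact Or.inl (Or.inr ⟨i, hi, hc, hx⟩)
          · exact Or.inr ⟨L', hL'', i, hi, hc, hx⟩
  rw [main]
  simp

-- the matched set answers exactly the substring test, for every lowered field name
lemma matched_contains_eq_isIn (values : List (String × String)) (text : List Char)
    (q : String × String) (hq : q ∈ values) :
    PySem.Set.contains
        (pvMatchedSet (PySem.Set.ofList (values.map (fun r => PySem.Chars.lower r.1.toList)))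
          (PySem.Set.ofList ((PySem.Set.ofList (values.map (fun r => PySem.Chars.lower r.1.toList))).map List.length))
          text)
        (PySem.Chars.lower q.1.toList)
      = PySem.Chars.isIn (PySem.Chars.lower q.1.toList) text := by
  set low := PySem.Chars.lower q.1.toList with hlow
  set lowset : PySem.Set (List Char) :=
    PySem.Set.ofList (values.map (fun r => PySem.Chars.lower r.1.toList)) with hlowset
  have hmemlow : low ∈ lowset := by
    rw [hlowset]
    exact (PySem.Set.mem_ofList _ _).mpr (List.mem_map.mpr ⟨q, hq, rfl⟩)
  have hlen : low.length ∈ PySem.Set.ofList (lowset.map List.length) :=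
    (PySem.Set.mem_ofList _ _).mpr (List.mem_map.mpr ⟨low, hmemlow, rfl⟩)
  by_cases hin : PySem.Chars.isIn low text = true
  · rw [hin]
    apply (PySem.Set.contains_iff _ _).mpr
    rw [mem_matchedSet]
    obtain ⟨j, hpre⟩ := (PySem.Chars.exists_prefix_drop_iff_isIn low text).mpr hin
    have htake : (text.drop j).take low.length = low := (List.prefix_iff_eq_take.mp hpre).symm
    have hlenle : low.length ≤ (text.drop j).length := hpre.length_le
    rw [List.length_drop] at hlenle
    by_cases h0 : low.length = 0
    · refine ⟨low.length, hlen, 0, ?_, ?_, ?_⟩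
      · simp [h0]
      · simpa [h0, List.length_eq_zero_iff.mp h0] using (PySem.Set.contains_iff _ _).mpr hmemlow
      · simp [(List.length_eq_zero_iff.mp h0)]
    · have hj : j ∈ List.range (text.length + 1 - low.length) := by
        rw [List.mem_range]; omega
      exact ⟨low.length, hlen, j, hj, by rw [htake]; exact (PySem.Set.contains_iff _ _).mpr hmemlow,
        htake.symm⟩
  · rw [Bool.not_eq_true] at hin
    rw [hin, ← Bool.not_eq_true]
    intro hc
    have := (PySem.Set.contains_iff _ _).mp hc
    rw [mem_matchedSet] at this
    obtain ⟨L, _, i, _, _, hx⟩ := this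
    have hpre : low <+: text.drop i := hx ▸ List.take_prefix _ _
    have : PySem.Chars.isIn low text = true :=
      (PySem.Chars.exists_prefix_drop_iff_isIn low text).mp ⟨i, hpre⟩
    simp [this] at hin

theorem ports_eq (validation : List (String × List (String × String))) (values : List (String × String)) :
    map_validations_to_fields_py validation values = map_validations_to_fields_py_alt validation values := by
  unfold map_validations_to_fields_py map_validations_to_fields_py_alt
  congr 1
  apply PySem.List.foldl_congr_mem
  intro d p _
  simp only
  apply PySem.List.foldl_congr_mem
  intro acc q hq
  rw [matched_contains_eq_isIn values (pvLowText p) q hq]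

-- ===== VERDICT (by name: the statement is the Claim_ definition above) =====
theorem map_validations_to_fields_py_spec : Claim_equal_map_validations_to_fields_py := by
  intro validation values _hdom
  exact ports_eq validation values
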